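-- pv_equiv track=rewrite | github.com/rafaelri/coding-challenge-solutions | python/stairs/stairs.py | num_ways_paint
-- ===== SOURCE A (Python) =====
-- def num_ways_paint(n, prev=None):
--     if n == 1:
--         if prev == 'y':
--             return 1
--         else:
--             return 2
--     else:
--         if prev == 'y':
--             return num_ways_paint(n-1, 'g')
--         else:
--             return num_ways_paint(n-1, 'y')+num_ways_paint(n-1, 'g')
-- ===== SOURCE B (Python) =====
-- def num_ways_paint(n, prev=None):
--     # iterative two-state DP: y = ways where current step is yellow, g = ways where it is green/other
--     y, g = (0, 1) if prev == 'y' else (1, 1)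
--     for _ in range(n - 1):
--         y, g = g, y + g
--     return y + g
-- ===== Notes on version B (the rewrite author's own statement) =====
-- stated objective: faster
-- what changed: replaced A's exponential branching recursion (two recursive calls per step) by a single iterative loop maintaining the two color-state counters (yellow-last, green-last).
import Mathlib
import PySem

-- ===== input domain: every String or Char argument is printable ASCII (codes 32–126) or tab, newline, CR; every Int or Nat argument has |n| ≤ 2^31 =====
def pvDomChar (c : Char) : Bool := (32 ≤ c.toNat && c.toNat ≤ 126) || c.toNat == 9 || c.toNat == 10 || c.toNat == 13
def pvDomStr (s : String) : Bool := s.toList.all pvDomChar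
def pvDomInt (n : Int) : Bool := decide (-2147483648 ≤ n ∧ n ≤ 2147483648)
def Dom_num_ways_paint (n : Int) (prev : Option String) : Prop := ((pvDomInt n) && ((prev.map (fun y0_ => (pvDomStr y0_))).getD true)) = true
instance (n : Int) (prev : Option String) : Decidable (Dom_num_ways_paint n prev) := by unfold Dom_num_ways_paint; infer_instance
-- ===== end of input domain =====

-- ===== PORT A =====
-- B replaces A's exponential double recursion by a single O(n) loop over two color-state counters.
-- (the 'else 0' branch is only a totality guard: Python A raises RecursionError there, excluded by Pre_)
def num_ways_paint (n : Int) (prev : Option String) : Int :=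
  if n == 1 then
    if prev == some "y" then 1 else 2
  else if n < 1 then 0
  else if prev == some "y" then
    num_ways_paint (n - 1) (some "g")
  else
    num_ways_paint (n - 1) (some "y") + num_ways_paint (n - 1) (some "g")
termination_by n.toNat
decreasing_by all_goals omega

-- ===== PORT B =====
def num_ways_paint_alt (n : Int) (prev : Option String) : Int :=
  let init : Int × Int := if prev == some "y" then (0, 1) else (1, 1)
  let p := (PySem.List.pyRange 0 (n - 1) 1).foldl (fun (s : Int × Int) _ => (s.2, s.1 + s.2)) init
  p.1 + p.2

-- ===== PRECONDITION & SPEC =====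
-- Pre_ excludes n < 1, where Python A recurses without a base case and raises RecursionError.
def Pre_num_ways_paint (n : Int) (prev : Option String) : Prop := 1 ≤ n
instance (n : Int) (prev : Option String) : Decidable (Pre_num_ways_paint n prev) := by unfold Pre_num_ways_paint; infer_instance
def pvWitness_num_ways_paint : Int × Option String := (3, some "y")

def Spec_num_ways_paint (n : Int) (prev : Option String) (out : Int) : Prop := out = num_ways_paint_alt n prev
instance (n : Int) (prev : Option String) (out : Int) : Decidable (Spec_num_ways_paint n prev out) := by unfold Spec_num_ways_paint; infer_instance

-- ===== CLAIM (what is proved, stated in full; the proofs are below) =====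
def Claim_equal_num_ways_paint : Prop := ∀ (n : Int) (prev : Option String), Dom_num_ways_paint n prev → Pre_num_ways_paint n prev → Spec_num_ways_paint n prev (num_ways_paint n prev)

-- ===== LEMMAS AND PROOFS =====

-- the loop of B as structural recursion on the step count
def pvLoop : Nat → Int × Int → Int × Int
  | 0, s => s
  | k + 1, s => pvLoop k (s.2, s.1 + s.2)

theorem pvLoop_succ_right (k : Nat) (s : Int × Int) :
    pvLoop (k + 1) s = ((pvLoop k s).2, (pvLoop k s).1 + (pvLoop k s).2) := by
  induction k generalizing s with
  | zero => simp [pvLoop]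
  | succ k ih => simp only [pvLoop]; rw [← ih]; rfl

theorem pvLoop_eq_foldl (k : Nat) (s : Int × Int) :
    (PySem.List.pyRange 0 (k : Int) 1).foldl (fun (s : Int × Int) _ => (s.2, s.1 + s.2)) s = pvLoop k s := by
  induction k generalizing s with
  | zero =>
    rw [show ((0:Nat):Int) = 0 from rfl, PySem.List.pyRange_one_eq_nil le_rfl]
    rfl
  | succ k ih =>
    rw [show ((k + 1 : Nat) : Int) = (k : Int) + 1 from by push_cast; ring,
        PySem.List.pyRange_one_succ_right (by omega), List.foldl_append, ih, pvLoop_succ_right]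
    rfl

theorem pvLoop_linear (k : Nat) (a b c d : Int) :
    pvLoop k (a + c, b + d) = ((pvLoop k (a, b)).1 + (pvLoop k (c, d)).1, (pvLoop k (a, b)).2 + (pvLoop k (c, d)).2) := by
  induction k generalizing a b c d with
  | zero => simp [pvLoop]
  | succ k ih =>
    simp only [pvLoop]
    rw [show (b + d, a + c + (b + d)) = (b + d, (a + b) + (c + d)) from by rw [Prod.mk.injEq]; constructor <;> ring]
    exact ih b (a + b) d (c + d)

-- A on (k+1) steps equals B's loop value
theorem pvA_eq (k : Nat) (prev : Option String) :
    num_ways_paint ((k : Int) + 1) prev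
      = (pvLoop k (if prev == some "y" then ((0 : Int), (1 : Int)) else (1, 1))).1
        + (pvLoop k (if prev == some "y" then ((0 : Int), (1 : Int)) else (1, 1))).2 := by
  induction k generalizing prev with
  | zero =>
    rw [num_ways_paint]
    by_cases h : prev = some "y" <;> simp [h, pvLoop]
  | succ k ih =>
    have hc : ((k + 1 : Nat) : Int) = (k : Int) + 1 := by push_cast; ring
    rw [hc, num_ways_paint]
    have e : (k : Int) + 1 + 1 - 1 = (k : Int) + 1 := by ring
    rw [if_neg (show ¬ ((((k : Int) + 1 + 1) == 1) = true) from by simp; omega),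
        if_neg (show ¬ ((k : Int) + 1 + 1 < 1) from by omega)]
    simp only [e]
    by_cases h : prev = some "y"
    · rw [if_pos (show (prev == some "y") = true from by simp [h]), h, ih]
      simp only [show ((some "g" : Option String) == some "y") = false from rfl,
                 Bool.false_eq_true, if_false, pvLoop]
      norm_num
    · have hb : (prev == some "y") = false := by simp [h]
      rw [if_neg (show ¬ ((prev == some "y") = true) from by simp [h]), ih, ih]
      simp only [hb, Bool.false_eq_true, if_false, pvLoop,
                 show ((some "y" : Option String) == some "y") = true from rfl,
                 show ((some "g" : Option String) == some "y") = false from rfl, if_true]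
      have hl := pvLoop_linear k 0 1 1 1
      rw [show ((1 : Int), (1 : Int) + 1) = ((0 : Int) + 1, (1 : Int) + 1) from by norm_num, hl]
      ring

-- ===== VERDICT (by name: the statement is the Claim_ definition above) =====
theorem num_ways_paint_spec : Claim_equal_num_ways_paint := by
  intro n prev _ hpre
  unfold Spec_num_ways_paint num_ways_paint_alt
  obtain ⟨k, hk⟩ : ∃ k : Nat, n = (k : Int) + 1 := ⟨(n - 1).toNat, by unfold Pre_num_ways_paint at hpre; omega⟩
  subst hk
  simp only [show (k : Int) + 1 - 1 = (k : Int) from by ring]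
  rw [pvLoop_eq_foldl, pvA_eq]
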